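-- pv_equiv track=rewrite | github.com/Jirehlov/VIB_Snapshots | utils/10.py | count_peak
-- ===== SOURCE A (Python) =====
-- import itertools
--
-- def count_peak(row):
--     count = 0
--     newrow = [k for k, _ in itertools.groupby(list(map(int, row)))]
--     n = len(newrow)
--     if newrow[0] > newrow[1]:
--         count += 1
--     for i in range(1, n-1):
--         if newrow[i] >= newrow[i-1] and newrow[i] >= newrow[i+1]:
--             count += 1
--     if newrow[n-1] > newrow[n-2]:
--         count += 1
--     return count
-- ===== SOURCE B (Python) =====
-- import itertools
--
-- def count_peak(row):
--     newrow = [k for k, _ in itertools.groupby(map(int, row))]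
--     diffs = [newrow[i + 1] - newrow[i] for i in range(len(newrow) - 1)]
--     total = sum(1 for j in range(len(diffs) - 1) if diffs[j] > 0 and diffs[j + 1] < 0)
--     if diffs[0] < 0:
--         total += 1
--     if diffs[-1] > 0:
--         total += 1
--     return total
-- ===== Notes on version B (the rewrite author's own statement) =====
-- stated objective: alternative
-- what changed: B replaces A's three-way indexed peak scan (boundary ifs plus an interior loop testing newrow[i] against both neighbours) by a difference-sequence decomposition: it builds diffs once and counts sign changes +/- in diffs plus the two boundary signs.
import Mathlib
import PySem

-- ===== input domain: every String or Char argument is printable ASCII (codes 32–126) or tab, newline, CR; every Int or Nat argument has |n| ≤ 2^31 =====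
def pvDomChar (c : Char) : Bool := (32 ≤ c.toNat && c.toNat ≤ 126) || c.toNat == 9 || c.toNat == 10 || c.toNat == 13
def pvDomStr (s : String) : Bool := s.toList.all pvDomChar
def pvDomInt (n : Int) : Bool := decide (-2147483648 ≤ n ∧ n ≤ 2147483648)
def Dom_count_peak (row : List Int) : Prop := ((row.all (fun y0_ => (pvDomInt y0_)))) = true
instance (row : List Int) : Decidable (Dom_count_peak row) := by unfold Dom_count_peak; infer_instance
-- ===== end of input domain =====

-- B counts peaks on the run-collapsed row via its difference sequence (sign changes) instead of
-- A's three-way indexed neighbour scan; same O(n) cost, different decomposition.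

-- ===== PORT A =====
-- [k for k, _ in itertools.groupby(list(map(int, row)))] : collapse adjacent equal runs (ints, so int() is identity)
def pvCollapse : List Int → List Int
  | [] => []
  | [a] => [a]
  | a :: b :: t => if a = b then pvCollapse (b :: t) else a :: pvCollapse (b :: t)

def count_peak (row : List Int) : Int :=
  let count : Int := 0
  let newrow := pvCollapse row
  let n : Int := (newrow.length : Int)
  -- newrow[0] > newrow[1] (IndexError when n < 2 is excluded by Pre_)
  let count := if PySem.List.pyGetD newrow 1 0 < PySem.List.pyGetD newrow 0 0 then count + 1 else count
  let count := (PySem.List.pyRange 1 (n - 1) 1).foldl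
      (fun count i =>
        if PySem.List.pyGetD newrow (i - 1) 0 ≤ PySem.List.pyGetD newrow i 0 ∧
           PySem.List.pyGetD newrow (i + 1) 0 ≤ PySem.List.pyGetD newrow i 0
        then count + 1 else count) count
  if PySem.List.pyGetD newrow (n - 2) 0 < PySem.List.pyGetD newrow (n - 1) 0 then count + 1 else count

-- ===== PORT B =====
def count_peak_alt (row : List Int) : Int :=
  let newrow := pvCollapse row
  let diffs := (PySem.List.pyRange 0 ((newrow.length : Int) - 1) 1).map
      (fun i => PySem.List.pyGetD newrow (i + 1) 0 - PySem.List.pyGetD newrow i 0)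
  let total : Int := ((PySem.List.pyRange 0 ((diffs.length : Int) - 1) 1).map
      (fun j => if 0 < PySem.List.pyGetD diffs j 0 ∧ PySem.List.pyGetD diffs (j + 1) 0 < 0
                then (1 : Int) else 0)).sum
  -- diffs[0] (IndexError when diffs is empty is excluded by Pre_)
  let total := if PySem.List.pyGetD diffs 0 0 < 0 then total + 1 else total
  if 0 < PySem.List.pyGetD diffs (-1) 0 then total + 1 else total

-- ===== PRECONDITION & SPEC =====
-- Pre_ excludes exactly the rows that collapse to fewer than two runs (empty rows or rows whose
-- elements are all equal): there both A and B raise IndexError.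
def Pre_count_peak (row : List Int) : Prop := ∃ x ∈ row, x ≠ row.headI
instance (row : List Int) : Decidable (Pre_count_peak row) := by unfold Pre_count_peak; infer_instance

def pvWitness_count_peak : List Int := [0, 1]

def Spec_count_peak (row : List Int) (out : Int) : Prop := out = count_peak_alt row
instance (row : List Int) (out : Int) : Decidable (Spec_count_peak row out) := by unfold Spec_count_peak; infer_instance

-- ===== CLAIM (what is proved, stated in full; the proofs are below) =====
def Claim_equal_count_peak : Prop := ∀ (row : List Int), Dom_count_peak row → Pre_count_peak row → Spec_count_peak row (count_peak row)

-- ===== LEMMAS AND PROOFS =====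

theorem pvCollapse_cons (t : List Int) (a : Int) : ∃ t', pvCollapse (a :: t) = a :: t' := by
  induction t generalizing a with
  | nil => exact ⟨[], rfl⟩
  | cons b t ih =>
    by_cases h : a = b
    · subst h
      obtain ⟨t', ht⟩ := ih a
      exact ⟨t', by simp [pvCollapse, ht]⟩
    · exact ⟨pvCollapse (b :: t), by simp [pvCollapse, h]⟩

theorem mem_pvCollapse (l : List Int) (x : Int) : x ∈ pvCollapse l ↔ x ∈ l := by
  induction l with
  | nil => simp [pvCollapse]
  | cons a t ih =>
    cases t with
    | nil => simp [pvCollapse]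
    | cons b t =>
      by_cases h : a = b
      · subst h
        simpa [pvCollapse] using ih
      · simp only [pvCollapse, if_neg h, List.mem_cons] at ih ⊢
        tauto

theorem chain'_pvCollapse (l : List Int) : (pvCollapse l).IsChain (· ≠ ·) := by
  induction l with
  | nil => simp [pvCollapse]
  | cons a t ih =>
    cases t with
    | nil => simp [pvCollapse]
    | cons b t =>
      by_cases h : a = b
      · simpa [pvCollapse, h] using ih
      · obtain ⟨t', ht⟩ := pvCollapse_cons t b
        simp only [pvCollapse, if_neg h, ht] at ih ⊢
        exact List.isChain_cons_cons.mpr ⟨h, ih⟩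

theorem two_le_length_pvCollapse (row : List Int) (h : Pre_count_peak row) :
    2 ≤ (pvCollapse row).length := by
  obtain ⟨x, hx, hne⟩ := h
  cases row with
  | nil => cases hx
  | cons a t =>
    obtain ⟨t', ht⟩ := pvCollapse_cons t a
    have hxmem : x ∈ pvCollapse (a :: t) := (mem_pvCollapse _ _).mpr hx
    rw [ht] at hxmem ⊢
    cases t' with
    | nil =>
      simp at hxmem
      exact absurd (by simpa using hxmem) hne
    | cons c t'' => simp

-- the core equality, stated over an arbitrary collapsed list
theorem pvCore (c : List Int) (h2 : 2 ≤ c.length) (hch : c.IsChain (· ≠ ·)) :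
    (let count : Int := 0
     let n : Int := (c.length : Int)
     let count := if PySem.List.pyGetD c 1 0 < PySem.List.pyGetD c 0 0 then count + 1 else count
     let count := (PySem.List.pyRange 1 (n - 1) 1).foldl
        (fun count i =>
          if PySem.List.pyGetD c (i - 1) 0 ≤ PySem.List.pyGetD c i 0 ∧
             PySem.List.pyGetD c (i + 1) 0 ≤ PySem.List.pyGetD c i 0
          then count + 1 else count) count
     if PySem.List.pyGetD c (n - 2) 0 < PySem.List.pyGetD c (n - 1) 0 then count + 1 else count) =
    (let diffs := (PySem.List.pyRange 0 ((c.length : Int) - 1) 1).map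
        (fun i => PySem.List.pyGetD c (i + 1) 0 - PySem.List.pyGetD c i 0)
     let total : Int := ((PySem.List.pyRange 0 ((diffs.length : Int) - 1) 1).map
        (fun j => if 0 < PySem.List.pyGetD diffs j 0 ∧ PySem.List.pyGetD diffs (j + 1) 0 < 0
                  then (1 : Int) else 0)).sum
     let total := if PySem.List.pyGetD diffs 0 0 < 0 then total + 1 else total
     if 0 < PySem.List.pyGetD diffs (-1) 0 then total + 1 else total) := by
  -- adjacent entries of a collapsed row are distinct, in getD form
  have hne : ∀ k : Nat, k + 1 < c.length → c.getD k 0 ≠ c.getD (k + 1) 0 := by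
    intro k hk
    rw [List.getD_eq_getElem _ _ (by omega : k < c.length), List.getD_eq_getElem _ _ hk]
    exact List.isChain_iff_getElem.mp hch k hk
  have hdiffs : (PySem.List.pyRange 0 ((c.length : Int) - 1) 1).map
      (fun i => PySem.List.pyGetD c (i + 1) 0 - PySem.List.pyGetD c i 0)
      = (List.range (c.length - 1)).map (fun k => c.getD (k + 1) 0 - c.getD k 0) := by
    rw [show ((c.length : Int) - 1) = ((c.length - 1 : Nat) : Int) by omega,
        PySem.List.pyRange_one, List.map_map]
    rw [show ((((c.length - 1 : Nat) : Int)) - 0).toNat = c.length - 1 by omega]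
    refine List.map_congr_left ?_
    intro k hk
    simp only [Function.comp_apply]
    rw [show (0 : Int) + (k : Int) + 1 = ((k + 1 : Nat) : Int) by omega,
        show (0 : Int) + (k : Int) = ((k : Nat) : Int) by omega,
        PySem.List.pyGetD_natCast, PySem.List.pyGetD_natCast]
  simp only [hdiffs]
  set D := (List.range (c.length - 1)).map (fun k => c.getD (k + 1) 0 - c.getD k 0) with hD
  have hDlen : D.length = c.length - 1 := by simp [hD]
  have hDne : D ≠ [] := by
    intro h
    rw [h] at hDlen
    simp at hDlen
    omega
  have hD0 : PySem.List.pyGetD D 0 0 = c.getD 1 0 - c.getD 0 0 := by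
    rw [show (0 : Int) = ((0 : Nat) : Int) from rfl, PySem.List.pyGetD_natCast, hD,
        List.getD_eq_getElem _ _ (by simp; omega)]
    simp
  have hDlast : PySem.List.pyGetD D (-1) 0 = c.getD (c.length - 1) 0 - c.getD (c.length - 2) 0 := by
    rw [PySem.List.pyGetD_neg_ofNat D 1 0 (by omega) (by omega)]
    simp only [hD, List.length_map, List.length_range, List.getElem_map, List.getElem_range]
    rw [show c.length - 1 - 1 + 1 = c.length - 1 by omega,
        show c.length - 1 - 1 = c.length - 2 by omega]
  have hAfold : ∀ a : Int, (PySem.List.pyRange 1 ((c.length : Int) - 1) 1).foldl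
      (fun count i => if PySem.List.pyGetD c (i - 1) 0 ≤ PySem.List.pyGetD c i 0 ∧
          PySem.List.pyGetD c (i + 1) 0 ≤ PySem.List.pyGetD c i 0 then count + 1 else count) a
      = a + ((List.range (c.length - 2)).countP
          (fun k => decide (c.getD k 0 ≤ c.getD (k + 1) 0 ∧ c.getD (k + 2) 0 ≤ c.getD (k + 1) 0)) : Int) := by
    intro a
    rw [show ((c.length : Int) - 1) = ((c.length - 1 : Nat) : Int) by omega, PySem.List.pyRange_one]
    rw [show ((((c.length - 1 : Nat) : Int)) - 1).toNat = c.length - 2 by omega]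
    rw [List.foldl_map, PySem.List.foldl_ite_add_one]
    congr 2
    apply List.countP_congr
    intro k hk
    rw [List.mem_range] at hk
    simp only [decide_eq_true_eq]
    rw [show (1 : Int) + (k : Int) - 1 = ((k : Nat) : Int) by omega,
        show (1 : Int) + (k : Int) = ((k + 1 : Nat) : Int) by omega,
        show ((k + 1 : Nat) : Int) + 1 = ((k + 2 : Nat) : Int) by omega,
        PySem.List.pyGetD_natCast, PySem.List.pyGetD_natCast, PySem.List.pyGetD_natCast]
  have hDget : ∀ k : Nat, k < c.length - 1 →
      PySem.List.pyGetD D ((k : Nat) : Int) 0 = c.getD (k + 1) 0 - c.getD k 0 := by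
    intro k hk
    rw [PySem.List.pyGetD_natCast, hD, List.getD_eq_getElem _ _ (by simp; omega)]
    simp
  have hBsum : ((PySem.List.pyRange 0 ((D.length : Int) - 1) 1).map
      (fun j => if 0 < PySem.List.pyGetD D j 0 ∧ PySem.List.pyGetD D (j + 1) 0 < 0
                then (1 : Int) else 0)).sum
      = ((List.range (c.length - 2)).countP
          (fun k => decide (c.getD k 0 < c.getD (k + 1) 0 ∧ c.getD (k + 2) 0 < c.getD (k + 1) 0)) : Int) := by
    rw [hDlen]
    rw [show ((c.length - 1 : Nat) : Int) - 1 = ((c.length - 2 : Nat) : Int) by omega,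
        PySem.List.pyRange_one, List.map_map]
    rw [show (((c.length - 2 : Nat) : Int) - 0).toNat = c.length - 2 by omega]
    simp only [Function.comp_def]
    rw [PySem.List.sum_map_ite_one_zero']
    congr 1
    apply List.countP_congr
    intro k hk
    rw [List.mem_range] at hk
    simp only [decide_eq_true_eq]
    rw [show (0 : Int) + (k : Int) = ((k : Nat) : Int) by omega,
        show ((k : Nat) : Int) + 1 = ((k + 1 : Nat) : Int) by omega,
        hDget k (by omega), hDget (k + 1) (by omega)]
    rw [show k + 1 + 1 = k + 2 by omega]
    omega
  have hcongr : ((List.range (c.length - 2)).countP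
        (fun k => decide (c.getD k 0 ≤ c.getD (k + 1) 0 ∧ c.getD (k + 2) 0 ≤ c.getD (k + 1) 0)))
      = ((List.range (c.length - 2)).countP
        (fun k => decide (c.getD k 0 < c.getD (k + 1) 0 ∧ c.getD (k + 2) 0 < c.getD (k + 1) 0))) := by
    apply List.countP_congr
    intro k hk
    rw [List.mem_range] at hk
    simp only [decide_eq_true_eq]
    have h1 := hne k (by omega)
    have h2 := hne (k + 1) (by omega)
    rw [show k + 1 + 1 = k + 2 by omega] at h2
    omega
  have hfirst1 : PySem.List.pyGetD c 1 0 = c.getD 1 0 := by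
    rw [show (1 : Int) = ((1 : Nat) : Int) from rfl, PySem.List.pyGetD_natCast]
  have hfirst0 : PySem.List.pyGetD c 0 0 = c.getD 0 0 := by
    rw [show (0 : Int) = ((0 : Nat) : Int) from rfl, PySem.List.pyGetD_natCast]
  have hlast1 : PySem.List.pyGetD c ((c.length : Int) - 1) 0 = c.getD (c.length - 1) 0 := by
    rw [show ((c.length : Int) - 1) = ((c.length - 1 : Nat) : Int) by omega, PySem.List.pyGetD_natCast]
  have hlast2 : PySem.List.pyGetD c ((c.length : Int) - 2) 0 = c.getD (c.length - 2) 0 := by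
    rw [show ((c.length : Int) - 2) = ((c.length - 2 : Nat) : Int) by omega, PySem.List.pyGetD_natCast]
  rw [hAfold, hBsum, hD0, hDlast, hfirst1, hfirst0, hlast1, hlast2, hcongr]
  split_ifs <;> omega

-- ===== VERDICT (by name: the statement is the Claim_ definition above) =====
theorem count_peak_spec : Claim_equal_count_peak := by
  intro row _ hpre
  unfold Spec_count_peak count_peak count_peak_alt
  exact pvCore (pvCollapse row) (two_le_length_pvCollapse row hpre) (chain'_pvCollapse row)
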